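-- pv_equiv track=rewrite | github.com/KirillSamoylov/KDM3.1 | Gamma.py | Coded
-- ===== SOURCE A (Python) =====
-- import string
--
-- def Gamma():
--     A = 7
--     B = 3
--     M = 4096
--     y = 2020
--     gamma_list = []
--     for i in range(8):
--         y = (A * y) % M
--         gamma_list.append(y)
--     return gamma_list
--
-- def Coded(text):
--     tt = str.maketrans(dict.fromkeys(string.punctuation))
--     text = text.translate(tt)
--     # находим индексы всех пробелов и записываем их
--     index = []
--     for i in range(len(text)):
--         if text[i] == ' ':
--             index.append(i)
--     # текст переводим в верхний регистр и удаляем пробелы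
--     text = text.upper().replace(' ', '')
--     coded_text = ''
--     gamma_list = Gamma()
--     cnt = 0
--     for i in range(len(text)):
--         coded_text += chr((ord(text[i]) + gamma_list[cnt] % 32))
--         cnt += 1
--         if cnt == 7:
--             cnt = 0
--     # возвращаем пробелы на места
--     for i in index:
--         coded_text = coded_text[0:i] + ' ' + coded_text[i:]
--     return coded_text
-- ===== SOURCE B (Python) =====
-- import string
--
-- _PUNCT = set(string.punctuation)
-- _OFF = [28, 4, 28, 4, 28, 4, 28]  # Gamma()[cnt] % 32 for cnt in 0..6
--
-- def Coded(text):
--     out = []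
--     cnt = 0
--     for ch in text:
--         if ch in _PUNCT:
--             continue
--         if ch == ' ':
--             out.append(' ')
--         else:
--             out.append(chr(ord(ch.upper()) + _OFF[cnt]))
--             cnt = (cnt + 1) % 7
--     return ''.join(out)
-- ===== Notes on version B (the rewrite author's own statement) =====
-- stated objective: alternative
-- what changed: A makes four passes (strip punctuation, scan for space indices, strip-and-uppercase, encode by string concatenation) and then re-slices the whole encoded string once per space to reinsert spaces; B is a single pass over the input that appends to a list, emits each space in place (so no index recording or reinsertion pass), using the precomputed 7-entry offset cycle instead of recomputing Gamma()%32; intended as faster, measured only ~1.4x at the largest size.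
import Mathlib
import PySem

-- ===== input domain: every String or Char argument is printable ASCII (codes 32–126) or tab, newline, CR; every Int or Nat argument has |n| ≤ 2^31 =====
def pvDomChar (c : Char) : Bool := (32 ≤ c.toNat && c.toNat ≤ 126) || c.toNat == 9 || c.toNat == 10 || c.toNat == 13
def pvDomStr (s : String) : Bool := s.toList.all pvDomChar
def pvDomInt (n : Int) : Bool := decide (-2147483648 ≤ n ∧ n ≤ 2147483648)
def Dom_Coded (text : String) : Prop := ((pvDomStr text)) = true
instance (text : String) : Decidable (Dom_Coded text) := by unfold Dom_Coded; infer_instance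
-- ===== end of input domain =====

-- B replaces A's several passes (strip punctuation, record space indices, strip-and-uppercase,
-- encode, then re-slice the string once per space) by a single pass emitting each space in place.


-- string.punctuation
def pvPunct : List Char := "!\"#$%&'()*+,-./:;<=>?@[\\]^_`{|}~".toList

-- ===== PORT A =====
-- Gamma(): eight iterations of y = (7 * y) % 4096 from y = 2020
def pvGamma : List Nat :=
  ((List.range 8).foldl (fun (p : List Nat × Nat) _ =>
      (p.1 ++ [(7 * p.2) % 4096], (7 * p.2) % 4096)) (([] : List Nat), 2020)).1

-- text.translate(maketrans(dict.fromkeys(punctuation))) deletes every punctuation character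
def pvTranslate (s : List Char) : List Char :=  -- text = text.translate(tt)
  s.filter (fun c => !(pvPunct.contains c))

def pvIndex (t : List Char) : List Nat :=       -- the space-index loop
  (List.range t.length).foldl
      (fun acc i => if t.getD i ' ' == ' ' then acc ++ [i] else acc) ([] : List Nat)

def pvEncode (t2 : List Char) : List Char :=    -- the coded_text loop with cnt
  ((List.range t2.length).foldl
      (fun (p : List Char × Nat) i =>
        (p.1 ++ [Char.ofNat ((t2.getD i ' ').toNat + pvGamma.getD p.2 0 % 32)],
         if p.2 + 1 == 7 then 0 else p.2 + 1)) (([] : List Char), 0)).1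

def pvCodedChars (s : List Char) : List Char :=
  (pvIndex (pvTranslate s)).foldl (fun ct i => ct.take i ++ ' ' :: ct.drop i)
    (pvEncode (PySem.Chars.replace (PySem.Chars.upper (pvTranslate s)) [' '] []))

def Coded (text : String) : String := String.ofList (pvCodedChars text.toList)

-- ===== PORT B =====
def pvOff : List Nat := [28, 4, 28, 4, 28, 4, 28]  -- Gamma()[cnt] % 32 for cnt in 0..6

def Coded_alt (text : String) : String :=
  String.ofList ((text.toList.foldl
    (fun (p : List Char × Nat) ch =>
      if pvPunct.contains ch then p
      else if ch == ' ' then (p.1 ++ [' '], p.2)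
      else (p.1 ++ [Char.ofNat ((PySem.Chars.upperChar ch).toNat + pvOff.getD p.2 0)],
            (p.2 + 1) % 7))
    (([] : List Char), 0)).1)

-- ===== PRECONDITION & SPEC =====
def Spec_Coded (text : String) (out : String) : Prop := out = Coded_alt text
instance (text : String) (out : String) : Decidable (Spec_Coded text out) := by unfold Spec_Coded; infer_instance

-- ===== CLAIM (what is proved, stated in full; the proofs are below) =====
def Claim_equal_Coded : Prop := ∀ (text : String), Dom_Coded text → Spec_Coded text (Coded text)

-- ===== LEMMAS AND PROOFS =====

-- space positions of a (punctuation-free) text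
def spIdx : List Char → List Nat
  | [] => []
  | c :: cs => if c == ' ' then 0 :: (spIdx cs).map (· + 1) else (spIdx cs).map (· + 1)

-- A's encoding loop as structural recursion over the space-free text
def encA : List Char → Nat → List Char
  | [], _ => []
  | c :: cs, cnt =>
      Char.ofNat (c.toNat + pvGamma.getD cnt 0 % 32) :: encA cs (if cnt + 1 == 7 then 0 else cnt + 1)

-- B's one-pass body on punctuation-free text
def encB : List Char → Nat → List Char
  | [], _ => []
  | c :: cs, cnt =>
      if c == ' ' then ' ' :: encB cs cnt
      else Char.ofNat ((PySem.Chars.upperChar c).toNat + pvOff.getD cnt 0) :: encB cs ((cnt + 1) % 7)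

-- B's one-pass body including the punctuation skip
def encBP : List Char → Nat → List Char
  | [], _ => []
  | c :: cs, cnt =>
      if pvPunct.contains c then encBP cs cnt
      else if c == ' ' then ' ' :: encBP cs cnt
      else Char.ofNat ((PySem.Chars.upperChar c).toNat + pvOff.getD cnt 0) :: encBP cs ((cnt + 1) % 7)

-- A's space-reinsertion loop
def reinsert (idx : List Nat) (t : List Char) : List Char :=
  idx.foldl (fun ct i => ct.take i ++ ' ' :: ct.drop i) t

lemma off_eq (cnt : Nat) (h : cnt < 7) : pvGamma.getD cnt 0 % 32 = pvOff.getD cnt 0 := by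
  interval_cases cnt <;> rfl

lemma spIdx_eq_filter_range (t : List Char) :
    (List.range t.length).filter (fun i => t.getD i ' ' == ' ') = spIdx t := by
  induction t with
  | nil => rfl
  | cons c cs ih =>
    rw [List.length_cons, List.range_succ_eq_map, List.filter_cons, List.filter_map]
    simp only [List.getD_cons_zero, List.getD_cons_succ, Function.comp_def]
    rw [spIdx]
    split <;> simp_all

lemma encA_fold (t : List Char) : ∀ (cnt : Nat) (acc : List Char),
    ((List.range t.length).foldl
      (fun (p : List Char × Nat) i =>
        (p.1 ++ [Char.ofNat ((t.getD i ' ').toNat + pvGamma.getD p.2 0 % 32)],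
         if p.2 + 1 == 7 then 0 else p.2 + 1)) (acc, cnt)).1 = acc ++ encA t cnt := by
  induction t with
  | nil => intro cnt acc; simp [encA]
  | cons c cs ih =>
    intro cnt acc
    rw [List.length_cons, List.range_succ_eq_map, List.foldl_cons, List.foldl_map]
    simp only [List.getD_cons_zero, List.getD_cons_succ]
    rw [ih _ _, encA]
    simp

lemma replace_space_go : ∀ (fuel : Nat) (l acc : List Char), l.length ≤ fuel →
    PySem.Chars.replace.go [' '] [] fuel l acc = acc.reverse ++ l.filter (fun c => !(c == ' ')) := by
  intro fuel
  induction fuel with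
  | zero =>
    intro l acc h
    have : l = [] := List.length_eq_zero_iff.mp (by omega)
    subst this; rfl
  | succ n ih =>
    intro l acc h
    match l with
    | [] => simp [PySem.Chars.replace.go]
    | c :: t =>
      rw [PySem.Chars.replace.go]
      by_cases hc : c = ' '
      · subst hc
        rw [if_pos (by simp [List.isPrefixOf])]
        simpa using ih t acc (by simpa using h)
      · rw [if_neg (by simp [List.isPrefixOf]; exact fun he => hc he.symm)]
        rw [ih t (c :: acc) (by simp at h; omega)]
        simp [hc]

lemma replace_space (s : List Char) :
    PySem.Chars.replace s [' '] [] = s.filter (fun c => !(c == ' ')) := by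
  rw [PySem.Chars.replace, if_neg (by simp)]
  simpa using replace_space_go s.length s [] le_rfl

lemma upperChar_eq_space_iff (c : Char) : (PySem.Chars.upperChar c == ' ') = (c == ' ') := by
  unfold PySem.Chars.upperChar PySem.Chars.islower
  split
  · rename_i h
    simp only [Bool.and_eq_true, decide_eq_true_eq, Char.le_def, UInt32.le_iff_toNat_le] at h
    have h1 : 97 ≤ c.toNat := h.1
    have h2 : c.toNat ≤ 122 := h.2
    have hv : (Char.ofNat (c.toNat - 32)).toNat = c.toNat - 32 := by
      rw [Char.toNat_ofNat, if_pos]; exact Or.inl (by omega)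
    have hne : Char.ofNat (c.toNat - 32) ≠ ' ' := by
      intro he
      have h3 := congrArg Char.toNat he
      rw [hv] at h3
      have : (' ' : Char).toNat = 32 := rfl
      omega
    have hc : c ≠ ' ' := by
      intro he; subst he
      have : (' ' : Char).toNat = 32 := rfl
      omega
    simp [hne, hc]
  · rfl

lemma upper_filter_space (t : List Char) :
    (PySem.Chars.upper t).filter (fun c => !(c == ' ')) =
      PySem.Chars.upper (t.filter (fun c => !(c == ' '))) := by
  unfold PySem.Chars.upper
  rw [List.filter_map]
  congr 1
  apply List.filter_congr
  intro c _
  simp [Function.comp, upperChar_eq_space_iff]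

lemma reinsert_shift (idx : List Nat) : ∀ (t : List Char) (e : Char),
    reinsert (idx.map (· + 1)) (e :: t) = e :: reinsert idx t := by
  induction idx with
  | nil => intro t e; rfl
  | cons i is ih =>
    intro t e
    simp only [List.map_cons, reinsert, List.foldl_cons, List.take_succ_cons, List.drop_succ_cons]
    exact ih _ e

lemma main_lemma : ∀ (s : List Char) (cnt : Nat), cnt < 7 →
    reinsert (spIdx s) (encA (PySem.Chars.upper (s.filter (fun c => !(c == ' ')))) cnt)
      = encB s cnt := by
  intro s
  induction s with
  | nil => intro cnt _; rfl
  | cons c cs ih =>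
    intro cnt hcnt
    rw [spIdx, encB, List.filter_cons]
    by_cases hs : c == ' '
    · simp only [hs, Bool.not_true, Bool.false_eq_true, if_false, if_true]
      have : reinsert (0 :: (spIdx cs).map (· + 1))
          (encA (PySem.Chars.upper (cs.filter (fun c => !(c == ' ')))) cnt)
          = reinsert ((spIdx cs).map (· + 1))
          (' ' :: encA (PySem.Chars.upper (cs.filter (fun c => !(c == ' ')))) cnt) := by
        simp [reinsert]
      rw [this, reinsert_shift, ih cnt hcnt]
    · simp only [hs, Bool.false_eq_true, if_false, Bool.not_false, if_true]
      have hup : PySem.Chars.upper (c :: cs.filter (fun c => !(c == ' ')))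
          = PySem.Chars.upperChar c :: PySem.Chars.upper (cs.filter (fun c => !(c == ' '))) := rfl
      rw [hup, encA]
      have hnext : (if cnt + 1 == 7 then 0 else cnt + 1) = (cnt + 1) % 7 := by
        by_cases h7 : cnt + 1 = 7
        · simp [h7]
        · have : (cnt + 1) % 7 = cnt + 1 := Nat.mod_eq_of_lt (by omega)
          simp [this]; omega
      rw [hnext, reinsert_shift, off_eq cnt hcnt, ih ((cnt + 1) % 7) (Nat.mod_lt _ (by omega))]

lemma encBP_eq_encB (s : List Char) : ∀ cnt,
    encBP s cnt = encB (s.filter (fun c => !(pvPunct.contains c))) cnt := by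
  induction s with
  | nil => intro cnt; rfl
  | cons c cs ih =>
    intro cnt
    rw [encBP, List.filter_cons]
    by_cases hp : pvPunct.contains c
    · simp only [hp, if_pos, Bool.not_true, Bool.false_eq_true, if_false]
      exact ih cnt
    · simp only [hp, Bool.false_eq_true, if_false, Bool.not_false, if_true]
      rw [encB]
      by_cases hs : c == ' ' <;> simp only [hs, if_true, if_false, Bool.false_eq_true] <;>
        rw [ih]

lemma encBP_fold (s : List Char) : ∀ (cnt : Nat) (acc : List Char),
    (s.foldl
      (fun (p : List Char × Nat) ch =>
        if pvPunct.contains ch then p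
        else if ch == ' ' then (p.1 ++ [' '], p.2)
        else (p.1 ++ [Char.ofNat ((PySem.Chars.upperChar ch).toNat + pvOff.getD p.2 0)],
              (p.2 + 1) % 7)) (acc, cnt)).1 = acc ++ encBP s cnt := by
  induction s with
  | nil => intro cnt acc; simp [encBP]
  | cons c cs ih =>
    intro cnt acc
    rw [List.foldl_cons, encBP]
    by_cases hp : pvPunct.contains c
    · simp only [hp, if_pos]; exact ih cnt acc
    · simp only [hp, if_neg, Bool.false_eq_true, not_false_iff]
      by_cases hs : c == ' '
      · simp only [hs, if_pos]
        rw [ih cnt (acc ++ [' '])]; simp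
      · simp only [hs, Bool.false_eq_true, if_false]
        rw [ih ((cnt + 1) % 7) _]; simp

-- ===== VERDICT (by name: the statement is the Claim_ definition above) =====
theorem Coded_spec : Claim_equal_Coded := by
  intro text _
  unfold Spec_Coded Coded Coded_alt
  apply congrArg String.ofList
  rw [encBP_fold, encBP_eq_encB]
  unfold pvCodedChars pvIndex pvEncode pvTranslate
  rw [PySem.List.foldl_append_if_eq_filter, List.nil_append, spIdx_eq_filter_range,
      replace_space, upper_filter_space, encA_fold, List.nil_append, List.nil_append]
  exact main_lemma _ 0 (by omega)
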